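-- pv_equiv track=rewrite | github.com/ParulParima/LabelMe-Image-Data-Augment- | Scripts/iseg_aug_yaml.py | cropitup
-- ===== SOURCE A (Python) =====
-- def cropitup(coordinates, width, height):
--     dummy = []
--     index = []
--     for i in range(0,len(coordinates)):
--         if coordinates[i][0]<=width and coordinates[i][1]<=height:
--             index.append(i)
--
--     if len(index) == 0:
--         return dummy
--     elif len(index) == len(coordinates):
--         return coordinates
--     else:
--         return dummy
-- ===== SOURCE B (Python) =====
-- def cropitup(coordinates, width, height):
--     if not coordinates:
--         return []
--     max_x = max(c[0] for c in coordinates)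
--     max_y = max(c[1] for c in coordinates)
--     return coordinates if max_x <= width and max_y <= height else []
-- ===== Notes on version B (the rewrite author's own statement) =====
-- stated objective: simpler
-- what changed: Replaces A's collect-passing-indices-then-compare-count-to-total scheme with two running-maximum reductions (max x, max y) compared against the bounds once.
-- outside the precondition, e.g. on cropitup([[5]], 1, 10): A returns [], B raises IndexError
import Mathlib
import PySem

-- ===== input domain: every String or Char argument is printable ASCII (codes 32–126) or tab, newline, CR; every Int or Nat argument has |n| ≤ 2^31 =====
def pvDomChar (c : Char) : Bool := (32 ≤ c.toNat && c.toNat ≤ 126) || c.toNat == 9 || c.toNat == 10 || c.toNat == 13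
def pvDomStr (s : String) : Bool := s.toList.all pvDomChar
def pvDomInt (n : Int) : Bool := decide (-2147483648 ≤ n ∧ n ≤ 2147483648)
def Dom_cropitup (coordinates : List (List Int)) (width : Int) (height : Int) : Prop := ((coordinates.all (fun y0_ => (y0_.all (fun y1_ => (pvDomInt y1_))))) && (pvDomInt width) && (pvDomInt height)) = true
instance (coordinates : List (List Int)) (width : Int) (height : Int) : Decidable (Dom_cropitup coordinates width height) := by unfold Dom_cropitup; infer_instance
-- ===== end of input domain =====

-- B replaces A's collect-passing-indices-then-compare-count scheme with two running-max
-- reductions compared against the bounds once (objective: simpler).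

-- ===== PORT A =====
-- literal port of A: build the list of passing indices, then decide by its length
def cropitup (coordinates : List (List Int)) (width : Int) (height : Int) : List (List Int) :=
  let dummy : List (List Int) := []
  let index : List Int :=
    (PySem.List.pyRange 0 (coordinates.length : Int) 1).foldl
      (fun idx i =>
        if PySem.List.pyGetD (PySem.List.pyGetD coordinates i []) 0 0 ≤ width ∧
           PySem.List.pyGetD (PySem.List.pyGetD coordinates i []) 1 0 ≤ height
        then idx ++ [i] else idx) []
  if index.length = 0 then dummy
  else if index.length = coordinates.length then coordinates
  else dummy

-- ===== PORT B =====
-- literal port of B: guard empty, then two running-maximum reductions (Python max over a generator)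
def cropitup_alt (coordinates : List (List Int)) (width : Int) (height : Int) : List (List Int) :=
  match coordinates with
  | [] => []
  | c :: rest =>
    let maxX : Int := rest.foldl (fun m d => max m (PySem.List.pyGetD d 0 0)) (PySem.List.pyGetD c 0 0)
    let maxY : Int := rest.foldl (fun m d => max m (PySem.List.pyGetD d 1 0)) (PySem.List.pyGetD c 1 0)
    if maxX ≤ width ∧ maxY ≤ height then c :: rest else []

-- ===== PRECONDITION & SPEC =====
-- Pre_ requires every coordinate to have at least two components: on shorter coordinates
-- A raises IndexError except when short-circuit on c[0] > width lets it return [] — there B raises.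
def Pre_cropitup (coordinates : List (List Int)) (width : Int) (height : Int) : Prop :=
  ∀ c ∈ coordinates, 2 ≤ c.length
instance (coordinates : List (List Int)) (width : Int) (height : Int) : Decidable (Pre_cropitup coordinates width height) := by unfold Pre_cropitup; infer_instance

def pvWitness_cropitup : List (List Int) × Int × Int := ([[1, 2], [3, 4]], 3, 4)

def Spec_cropitup (coordinates : List (List Int)) (width : Int) (height : Int) (out : List (List Int)) : Prop := out = cropitup_alt coordinates width height
instance (coordinates : List (List Int)) (width : Int) (height : Int) (out : List (List Int)) : Decidable (Spec_cropitup coordinates width height out) := by unfold Spec_cropitup; infer_instance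

-- ===== CLAIM (what is proved, stated in full; the proofs are below) =====
def Claim_equal_cropitup : Prop := ∀ (coordinates : List (List Int)) (width : Int) (height : Int), Dom_cropitup coordinates width height → Pre_cropitup coordinates width height → Spec_cropitup coordinates width height (cropitup coordinates width height)

-- ===== LEMMAS AND PROOFS =====

-- running maximum of f over t, seeded with x, is ≤ w iff the seed and every mapped element are
theorem foldl_max_le_iff (t : List (List Int)) (f : List Int → Int) (x w : Int) :
    t.foldl (fun m d => max m (f d)) x ≤ w ↔ x ≤ w ∧ ∀ d ∈ t, f d ≤ w := by
  induction t generalizing x with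
  | nil => simp
  | cons y ys ih =>
    simp only [List.foldl_cons, ih, max_le_iff, List.mem_cons]
    constructor
    · rintro ⟨⟨hx, hy⟩, hall⟩
      exact ⟨hx, fun d hd => hd.elim (fun h => h ▸ hy) (hall d)⟩
    · rintro ⟨hx, hall⟩
      exact ⟨⟨hx, hall y (Or.inl rfl)⟩, fun d hd => hall d (Or.inr hd)⟩

-- A's index list is the filter of the index range
theorem cropitup_index_eq (coordinates : List (List Int)) (width height : Int) :
    (PySem.List.pyRange 0 (coordinates.length : Int) 1).foldl
      (fun idx i =>
        if PySem.List.pyGetD (PySem.List.pyGetD coordinates i []) 0 0 ≤ width ∧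
           PySem.List.pyGetD (PySem.List.pyGetD coordinates i []) 1 0 ≤ height
        then idx ++ [i] else idx) ([] : List Int)
    = (PySem.List.pyRange 0 (coordinates.length : Int) 1).filter
        (fun i => decide (PySem.List.pyGetD (PySem.List.pyGetD coordinates i []) 0 0 ≤ width ∧
                          PySem.List.pyGetD (PySem.List.pyGetD coordinates i []) 1 0 ≤ height)) := by
  rw [PySem.List.foldl_append_ite_eq_filter]
  simp

-- the length of that filter counts the coordinates passing the bound test
theorem cropitup_count (coordinates : List (List Int)) (width height : Int) :
    ((PySem.List.pyRange 0 (coordinates.length : Int) 1).filter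
        (fun i => decide (PySem.List.pyGetD (PySem.List.pyGetD coordinates i []) 0 0 ≤ width ∧
                          PySem.List.pyGetD (PySem.List.pyGetD coordinates i []) 1 0 ≤ height))).length
    = coordinates.countP
        (fun c => decide (PySem.List.pyGetD c 0 0 ≤ width ∧ PySem.List.pyGetD c 1 0 ≤ height)) := by
  rw [← List.countP_eq_length_filter]
  have h := PySem.List.map_pyGetD_pyRange_zero' (xs := coordinates) (d := ([] : List Int))
  calc (PySem.List.pyRange 0 (coordinates.length : Int) 1).countP
          (fun i => decide (PySem.List.pyGetD (PySem.List.pyGetD coordinates i []) 0 0 ≤ width ∧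
                            PySem.List.pyGetD (PySem.List.pyGetD coordinates i []) 1 0 ≤ height))
      = ((PySem.List.pyRange 0 (coordinates.length : Int) 1).map
          (fun j => PySem.List.pyGetD coordinates j [])).countP
          (fun c => decide (PySem.List.pyGetD c 0 0 ≤ width ∧ PySem.List.pyGetD c 1 0 ≤ height)) := by
        rw [List.countP_map]; rfl
    _ = coordinates.countP
          (fun c => decide (PySem.List.pyGetD c 0 0 ≤ width ∧ PySem.List.pyGetD c 1 0 ≤ height)) := by
        rw [h]

-- ===== VERDICT (by name: the statement is the Claim_ definition above) =====
theorem cropitup_spec : Claim_equal_cropitup := by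
  intro coordinates width height _ _
  unfold Spec_cropitup cropitup cropitup_alt
  simp only [cropitup_index_eq, cropitup_count]
  set p : List Int → Bool :=
    fun c => decide (PySem.List.pyGetD c 0 0 ≤ width ∧ PySem.List.pyGetD c 1 0 ≤ height) with hp
  rcases coordinates with _ | ⟨c, rest⟩
  · simp
  · dsimp only
    by_cases hall : ∀ d ∈ (c :: rest), p d = true
    · have hcount : (c :: rest).countP p = (c :: rest).length := by
        rw [List.countP_eq_length]; exact hall
      have hX : rest.foldl (fun m d => max m (PySem.List.pyGetD d 0 0)) (PySem.List.pyGetD c 0 0) ≤ width := by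
        rw [foldl_max_le_iff]
        refine ⟨?_, fun d hd => ?_⟩
        · exact (of_decide_eq_true (hall c (by simp))).1
        · exact (of_decide_eq_true (hall d (by simp [hd]))).1
      have hY : rest.foldl (fun m d => max m (PySem.List.pyGetD d 1 0)) (PySem.List.pyGetD c 1 0) ≤ height := by
        rw [foldl_max_le_iff]
        refine ⟨?_, fun d hd => ?_⟩
        · exact (of_decide_eq_true (hall c (by simp))).2
        · exact (of_decide_eq_true (hall d (by simp [hd]))).2
      rw [hcount]
      simp [hX, hY]
    · -- some coordinate fails: A's count is below the length, B's max check fails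
      have hlt : (c :: rest).countP p < (c :: rest).length := by
        rcases not_forall.mp hall with ⟨d, hd⟩
        rcases Classical.not_imp.mp hd with ⟨hmem, hdp⟩
        exact List.countP_lt_length_iff.mpr ⟨d, hmem, by simpa using hdp⟩
      have hB : ¬ (rest.foldl (fun m d => max m (PySem.List.pyGetD d 0 0)) (PySem.List.pyGetD c 0 0) ≤ width ∧
                   rest.foldl (fun m d => max m (PySem.List.pyGetD d 1 0)) (PySem.List.pyGetD c 1 0) ≤ height) := by
        rintro ⟨hX, hY⟩
        apply hall
        intro d hd
        rw [hp]
        rw [foldl_max_le_iff] at hX hY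
        rcases List.mem_cons.mp hd with h | h
        · subst h; exact decide_eq_true ⟨hX.1, hY.1⟩
        · exact decide_eq_true ⟨hX.2 d h, hY.2 d h⟩
      rw [if_neg hB]
      rcases Nat.eq_zero_or_pos ((c :: rest).countP p) with h0 | hpos
      · simp [h0]
      · rw [if_neg (by omega), if_neg (by omega)]
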